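-- pv_equiv track=rewrite | github.com/tinloaf/bibchex | bibchex/strutil.py | lower_case_first_letters
-- ===== SOURCE A (Python) =====
-- def lower_case_first_letters(original):
--     def is_word_separator(s):
--         return s.isspace() or s in ['-', '/']
--
--     phrase = str(original)
--     i = 0
--     last_whitespace = True
--     while i < len(phrase):
--         if last_whitespace and not is_word_separator(phrase[i]):
--             lower_letter = phrase[i].lower()
--             # TODO The efficiency is below 9000. :(
--             phrase = phrase[:i] + lower_letter + phrase[i+1:]
--
--         last_whitespace = is_word_separator(phrase[i])
--
--         i += 1
--     return phrase
-- ===== SOURCE B (Python) =====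
-- def lower_case_first_letters(original):
--     def is_word_separator(s):
--         return s.isspace() or s in ['-', '/']
--
--     phrase = str(original)
--     parts = []
--     i, n = 0, len(phrase)
--     while i < n:
--         j = i + 1
--         while j < n and is_word_separator(phrase[j]) == is_word_separator(phrase[i]):
--             j += 1
--         run = phrase[i:j]
--         if not is_word_separator(phrase[i]):
--             run = run[0].lower() + run[1:]
--         parts.append(run)
--         i = j
--     return ''.join(parts)
-- ===== Notes on version B (the rewrite author's own statement) =====
-- stated objective: alternative
-- what changed: A walks the string char-by-char with a carried last-was-separator flag and rebuilds the whole string by slicing at every word start; B instead cuts the string into maximal separator/word runs and lowercases only each word run's first character, joining the collected pieces once at the end (it trades A's repeated full-string slicing for an explicit run scan).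
import Mathlib
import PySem

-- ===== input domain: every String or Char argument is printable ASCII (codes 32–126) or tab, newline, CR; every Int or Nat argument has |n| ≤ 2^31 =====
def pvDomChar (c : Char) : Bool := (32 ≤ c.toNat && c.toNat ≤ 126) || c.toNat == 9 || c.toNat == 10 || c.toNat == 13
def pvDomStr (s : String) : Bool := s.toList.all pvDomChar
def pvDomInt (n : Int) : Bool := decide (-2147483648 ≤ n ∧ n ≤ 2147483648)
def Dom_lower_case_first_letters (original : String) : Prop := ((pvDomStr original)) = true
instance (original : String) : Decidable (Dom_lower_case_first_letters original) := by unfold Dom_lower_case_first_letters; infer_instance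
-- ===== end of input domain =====

-- B replaces A's per-character scan with string re-slicing at every word start by a pass over
-- maximal separator/word runs, lowercasing only each word run's first char (objective: alternative).


-- ===== PORT A =====
-- is_word_separator(s) for a one-character string s
def pvSep (c : Char) : Bool := PySem.Chars.isspace c || c == '-' || c == '/'

-- the while loop of A; phrase[:i] + lower + phrase[i+1:] with 0 ≤ i < len is take/drop
-- fuel = number of loop iterations still possible (phrase length is invariant); purely a
-- totality guard, the loop body is unchanged
def pvLoopA : Nat → List Char → Nat → Bool → List Char
  | 0, phrase, _, _ => phrase
  | fuel + 1, phrase, i, lastW =>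
    if h : i < phrase.length then
      let c := phrase[i]
      if lastW && !pvSep c then
        let c' := PySem.Chars.lowerChar c
        pvLoopA fuel (phrase.take i ++ [c'] ++ phrase.drop (i + 1)) (i + 1) (pvSep c')
      else
        pvLoopA fuel phrase (i + 1) (pvSep c)
    else phrase

def lower_case_first_letters (original : String) : String :=
  String.mk (pvLoopA original.toList.length original.toList 0 true)

-- ===== PORT B =====
-- outer while loop of B: cut the string into maximal same-class runs, lowering each
-- word run's first character (run = phrase[i:j], inner while = takeWhile/dropWhile)
-- fuel ≥ number of runs still to cut (the string length suffices); purely a totality guard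
def pvRunsB : Nat → List Char → List (List Char)
  | 0, _ => []
  | fuel + 1, l =>
    match l with
    | [] => []
    | c :: cs =>
      let body := cs.takeWhile (fun d => pvSep d == pvSep c)
      let rest := cs.dropWhile (fun d => pvSep d == pvSep c)
      (if !pvSep c then PySem.Chars.lowerChar c :: body else c :: body) :: pvRunsB fuel rest

def lower_case_first_letters_alt (original : String) : String :=
  String.mk (pvRunsB original.toList.length original.toList).flatten

-- ===== PRECONDITION & SPEC =====
def Spec_lower_case_first_letters (original : String) (out : String) : Prop := out = lower_case_first_letters_alt original
instance (original : String) (out : String) : Decidable (Spec_lower_case_first_letters original out) := by unfold Spec_lower_case_first_letters; infer_instance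

-- ===== CLAIM (what is proved, stated in full; the proofs are below) =====
def Claim_equal_lower_case_first_letters : Prop := ∀ (original : String), Dom_lower_case_first_letters original → Spec_lower_case_first_letters original (lower_case_first_letters original)

-- ===== LEMMAS AND PROOFS =====

-- the common one-pass specification: carry "previous char was a separator"
def pvGo : List Char → Bool → List Char
  | [], _ => []
  | c :: cs, lastW =>
    let c' := if lastW && !pvSep c then PySem.Chars.lowerChar c else c
    c' :: pvGo cs (pvSep c')

theorem pvSep_of_toNat (x : Char) (h65 : 65 ≤ x.toNat) (h122 : x.toNat ≤ 122) :
    pvSep x = false := by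
  have h1 : PySem.Chars.isspace x = false := by
    simp only [PySem.Chars.isspace, Bool.or_eq_false_iff, decide_eq_false_iff_not,
      Bool.and_eq_false_iff]
    omega
  have h2 : (x == '-') = false := by
    rw [beq_eq_false_iff_ne]
    intro e; subst e; revert h65; decide
  have h3 : (x == '/') = false := by
    rw [beq_eq_false_iff_ne]
    intro e; subst e; revert h65; decide
  simp [pvSep, h1, h2, h3]

theorem pvSep_lowerChar (c : Char) : pvSep (PySem.Chars.lowerChar c) = pvSep c := by
  by_cases h : PySem.Chars.isupper c = true
  · have h65 : 65 ≤ c.toNat ∧ c.toNat ≤ 90 := by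
      simp only [PySem.Chars.isupper, Bool.and_eq_true, decide_eq_true_eq, Char.le_def] at h
      exact ⟨h.1, h.2⟩
    have hval : (c.toNat + 32).isValidChar := Or.inl (by omega)
    have ht : (Char.ofNat (c.toNat + 32)).toNat = c.toNat + 32 := by
      rw [Char.toNat_ofNat, if_pos hval]
    simp only [PySem.Chars.lowerChar, h, if_true]
    rw [pvSep_of_toNat (Char.ofNat (c.toNat + 32)) (by rw [ht]; omega) (by rw [ht]; omega),
      pvSep_of_toNat c (by omega) (by omega)]
  · simp [PySem.Chars.lowerChar, h]

theorem pvLoopA_eq_pvGo (fuel : Nat) (suf pre : List Char) (lastW : Bool)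
    (hf : suf.length ≤ fuel) :
    pvLoopA fuel (pre ++ suf) pre.length lastW = pre ++ pvGo suf lastW := by
  induction fuel generalizing suf pre lastW with
  | zero =>
    have hsuf : suf = [] := List.eq_nil_of_length_eq_zero (by omega)
    subst hsuf
    simp [pvLoopA, pvGo]
  | succ fuel ih =>
  cases suf with
  | nil => rw [pvLoopA]; simp [pvGo]
  | cons c cs =>
    have hlt : pre.length < (pre ++ c :: cs).length := by simp
    have hget : (pre ++ c :: cs)[pre.length]'hlt = c := by
      simp
    rw [pvLoopA, dif_pos hlt]
    simp only [hget]
    by_cases hb : (lastW && !pvSep c) = true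
    · rw [if_pos hb]
      have htake : (pre ++ c :: cs).take pre.length = pre := by
        simp
      have hdrop : (pre ++ c :: cs).drop (pre.length + 1) = cs := by
        have : pre ++ c :: cs = (pre ++ [c]) ++ cs := by simp
        rw [this]
        have hl : pre.length + 1 = (pre ++ [c]).length := by simp
        rw [hl, List.drop_left]
      rw [htake, hdrop]
      have hre : pre ++ [PySem.Chars.lowerChar c] ++ cs = (pre ++ [PySem.Chars.lowerChar c]) ++ cs := by
        simp
      have hl : pre.length + 1 = (pre ++ [PySem.Chars.lowerChar c]).length := by simp
      rw [hre, hl, ih cs _ _ (by simp at hf ⊢; omega)]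
      simp [pvGo, hb]
    · rw [if_neg hb]
      have hre : pre ++ c :: cs = (pre ++ [c]) ++ cs := by simp
      have hl : pre.length + 1 = (pre ++ [c]).length := by simp
      rw [hre, hl, ih cs _ _ (by simp at hf ⊢; omega)]
      simp [pvGo, hb]

theorem pvGo_sep_run (body rest : List Char) (h : ∀ d ∈ body, pvSep d = true) :
    pvGo (body ++ rest) true = body ++ pvGo rest true := by
  induction body with
  | nil => rfl
  | cons d ds ih =>
    have hd : pvSep d = true := h d (List.mem_cons_self ..)
    simp only [List.cons_append, pvGo, hd, Bool.not_true, Bool.and_false, if_false,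
      Bool.false_eq_true, List.cons.injEq, true_and]
    exact ih (fun x hx => h x (List.mem_cons_of_mem _ hx))

theorem pvGo_word_run (body rest : List Char) (h : ∀ d ∈ body, pvSep d = false) :
    pvGo (body ++ rest) false = body ++ pvGo rest false := by
  induction body with
  | nil => rfl
  | cons d ds ih =>
    have hd : pvSep d = false := h d (List.mem_cons_self ..)
    simp only [List.cons_append, pvGo, hd, Bool.false_and, if_false, Bool.false_eq_true,
      List.cons.injEq, true_and]
    exact ih (fun x hx => h x (List.mem_cons_of_mem _ hx))

theorem pvGo_flag_irrel (l : List Char) (h : ∀ c cs, l = c :: cs → pvSep c = true) :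
    pvGo l false = pvGo l true := by
  cases l with
  | nil => rfl
  | cons c cs =>
    have hc := h c cs rfl
    simp [pvGo, hc]

theorem pvRunsB_flatten_eq_pvGo (fuel : Nat) (l : List Char) (hf : l.length ≤ fuel) :
    (pvRunsB fuel l).flatten = pvGo l true := by
  induction fuel generalizing l with
  | zero =>
    have hl : l = [] := List.eq_nil_of_length_eq_zero (by omega)
    subst hl
    simp [pvRunsB, pvGo]
  | succ fuel ih =>
  cases l with
  | nil => simp [pvRunsB, pvGo]
  | cons c cs =>
    rw [pvRunsB]
    simp only [List.flatten_cons]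
    set body := cs.takeWhile (fun d => pvSep d == pvSep c) with hB
    set rest := cs.dropWhile (fun d => pvSep d == pvSep c) with hR
    have hsplit : body ++ rest = cs := List.takeWhile_append_dropWhile
    have hbody : ∀ d ∈ body, pvSep d = pvSep c := by
      intro d hd
      have := List.mem_takeWhile_imp (hB ▸ hd)
      simpa using this
    have hrest : ∀ d ds, rest = d :: ds → pvSep d ≠ pvSep c := by
      intro d ds hds
      have := List.head?_dropWhile_not (fun d => pvSep d == pvSep c) cs
      rw [← hR, hds] at this
      simpa using this
    have hlen : rest.length ≤ fuel := by
      have := List.length_dropWhile_le (fun d => pvSep d == pvSep c) cs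
      rw [← hR] at this
      simp only [List.length_cons] at hf; omega
    have ihrest := ih rest hlen
    rw [ihrest]
    cases hc : pvSep c with
    | true =>
      rw [if_neg (by decide)]
      have hgo : pvGo (c :: cs) true = c :: pvGo (body ++ rest) true := by
        rw [hsplit]; simp [pvGo, hc]
      rw [hgo, pvGo_sep_run _ _ (fun d hd => by rw [hbody d hd, hc])]
      simp
    | false =>
      rw [if_pos (by decide)]
      have hgo : pvGo (c :: cs) true =
          PySem.Chars.lowerChar c :: pvGo (body ++ rest) false := by
        rw [hsplit]
        simp [pvGo, hc, pvSep_lowerChar]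
      rw [hgo, pvGo_word_run _ _ (fun d hd => by rw [hbody d hd, hc])]
      rw [pvGo_flag_irrel _ (fun d ds hds => by
        have := hrest d ds hds
        rw [hc] at this
        simpa using this)]
      simp

-- ===== VERDICT (by name: the statement is the Claim_ definition above) =====
theorem lower_case_first_letters_spec : Claim_equal_lower_case_first_letters := by
  intro original _
  unfold Spec_lower_case_first_letters lower_case_first_letters lower_case_first_letters_alt
  rw [pvRunsB_flatten_eq_pvGo _ _ le_rfl]
  have h0 := pvLoopA_eq_pvGo original.toList.length original.toList [] true le_rfl
  simp only [List.nil_append, List.length_nil] at h0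
  rw [h0]
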